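-- pv_equiv track=rewrite | github.com/Hemant-tyagi9/Ternary-CPU | CPU/main.py | forwarding_values
-- ===== SOURCE A (Python) =====
-- def forwarding_values(registers, instr, ex_instr, ex_result, mem_instr, mem_result):
--     forwarded = []
--     for src in instr.get("src", []):
--         if ex_instr and src == ex_instr.get("dest"):
--             forwarded.append(ex_result)
--         elif mem_instr and src == mem_instr.get("dest"):
--             forwarded.append(mem_result)
--         else:
--             forwarded.append(registers[src])
--     return forwarded
-- ===== SOURCE B (Python) =====
-- def forwarding_values(registers, instr, ex_instr, ex_result, mem_instr, mem_result):
--     # Staged overwrite: preallocate one slot per source, stamp MEM forwards,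
--     # then stamp EX forwards over them (pass order = elif priority), and
--     # finally fill the still-empty slots from the register file.
--     srcs = instr.get("src", [])
--     out = [None] * len(srcs)
--     if mem_instr:
--         d = mem_instr.get("dest")
--         if d is not None:
--             for i, s in enumerate(srcs):
--                 if s == d:
--                     out[i] = mem_result
--     if ex_instr:
--         d = ex_instr.get("dest")
--         if d is not None:
--             for i, s in enumerate(srcs):
--                 if s == d:
--                     out[i] = ex_result
--     for i, s in enumerate(srcs):
--         if out[i] is None:
--             out[i] = registers[s]
--     return out
-- ===== Notes on version B (the rewrite author's own statement) =====
-- stated objective: alternative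
-- what changed: B replaces A's single pass with a per-source three-way branch chain by staged overwrite passes over a preallocated slot array: a MEM pass stamps matching slots, an EX pass then overwrites them (pass order encodes the elif priority), and a final pass fills the remaining empty slots from the register file.
import Mathlib
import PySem

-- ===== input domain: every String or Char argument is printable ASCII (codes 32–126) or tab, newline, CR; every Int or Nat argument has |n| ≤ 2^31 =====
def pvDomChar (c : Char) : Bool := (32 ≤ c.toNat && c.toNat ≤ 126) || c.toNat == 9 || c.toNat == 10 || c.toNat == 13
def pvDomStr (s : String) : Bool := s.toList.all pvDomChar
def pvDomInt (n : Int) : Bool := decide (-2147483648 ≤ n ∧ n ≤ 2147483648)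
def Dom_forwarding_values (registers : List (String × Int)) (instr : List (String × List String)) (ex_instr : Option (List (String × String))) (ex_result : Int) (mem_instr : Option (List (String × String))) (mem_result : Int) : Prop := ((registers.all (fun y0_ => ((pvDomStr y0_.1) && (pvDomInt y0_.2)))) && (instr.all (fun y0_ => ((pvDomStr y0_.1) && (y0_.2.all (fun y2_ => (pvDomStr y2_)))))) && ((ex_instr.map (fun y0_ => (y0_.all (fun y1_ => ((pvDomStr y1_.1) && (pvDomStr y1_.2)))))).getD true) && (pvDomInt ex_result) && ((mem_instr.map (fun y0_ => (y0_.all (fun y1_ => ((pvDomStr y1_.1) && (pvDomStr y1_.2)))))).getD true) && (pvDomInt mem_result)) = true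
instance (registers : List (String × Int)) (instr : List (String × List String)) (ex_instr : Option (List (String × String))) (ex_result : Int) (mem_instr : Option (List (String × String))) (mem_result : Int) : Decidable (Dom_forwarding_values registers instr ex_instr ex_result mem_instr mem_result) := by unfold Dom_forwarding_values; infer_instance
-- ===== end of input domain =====

-- ===== PORT A =====
-- B resolves sources by staged overwrite passes (MEM stamp, EX stamp, register fill) instead of
-- A's per-source branch chain; same cost; equal return values on Pre_.
-- shared helper: Python dict lookup d.get(k) on an association list (first match)
def pvLookup {a : Type} (l : List (String × a)) (k : String) : Option a :=
  (l.find? (fun p => p.1 == k)).map (·.2)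

-- 'instr and instr.get("dest")' combined: none unless the optional dict is truthy (non-empty) and has a "dest" key
def pvDest (o : Option (List (String × String))) : Option String :=
  match o with
  | some d => if d.isEmpty then none else pvLookup d "dest"
  | none => none

def forwarding_values (registers : List (String × Int)) (instr : List (String × List String)) (ex_instr : Option (List (String × String))) (ex_result : Int) (mem_instr : Option (List (String × String))) (mem_result : Int) : List Int :=
  ((pvLookup instr "src").getD []).foldl (fun forwarded src =>
    forwarded ++ [
      if pvDest ex_instr == some src then ex_result
      else if pvDest mem_instr == some src then mem_result
      else (pvLookup registers src).getD 0  -- registers[src]; KeyError case excluded by Pre_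
    ]) []

-- ===== PORT B =====
-- a stamping pass: 'for i, s in enumerate(srcs): if s == d: out[i] = v' (slots kept aligned with srcs via zip)
def fvStamp (srcs : List String) (out : List (Option Int)) (d : String) (v : Int) : List (Option Int) :=
  (srcs.zip out).map (fun p => if p.1 = d then some v else p.2)

def forwarding_values_alt (registers : List (String × Int)) (instr : List (String × List String)) (ex_instr : Option (List (String × String))) (ex_result : Int) (mem_instr : Option (List (String × String))) (mem_result : Int) : List Int :=
  let srcs := (pvLookup instr "src").getD []
  let out0 : List (Option Int) := srcs.map (fun _ => none)   -- out = [None] * len(srcs)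
  let out1 := match pvDest mem_instr with
    | some d => fvStamp srcs out0 d mem_result
    | none => out0
  let out2 := match pvDest ex_instr with
    | some d => fvStamp srcs out1 d ex_result
    | none => out1
  -- final fill pass: 'if out[i] is None: out[i] = registers[s]'
  (srcs.zip out2).map (fun p => match p.2 with
    | some v => v
    | none => (pvLookup registers p.1).getD 0)  -- registers[s]; KeyError case excluded by Pre_

-- ===== PRECONDITION & SPEC =====
-- Pre_ excludes exactly the inputs where A raises KeyError: a source register that is
-- neither forwarded from EX/MEM nor present in the register file.
def Pre_forwarding_values (registers : List (String × Int)) (instr : List (String × List String)) (ex_instr : Option (List (String × String))) (ex_result : Int) (mem_instr : Option (List (String × String))) (mem_result : Int) : Prop :=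
  ∀ s ∈ (pvLookup instr "src").getD [],
    pvDest ex_instr = some s ∨ pvDest mem_instr = some s ∨ (pvLookup registers s).isSome = true
instance (registers : List (String × Int)) (instr : List (String × List String)) (ex_instr : Option (List (String × String))) (ex_result : Int) (mem_instr : Option (List (String × String))) (mem_result : Int) : Decidable (Pre_forwarding_values registers instr ex_instr ex_result mem_instr mem_result) := by unfold Pre_forwarding_values; infer_instance

def pvWitness_forwarding_values : (List (String × Int)) × (List (String × List String)) × (Option (List (String × String))) × Int × (Option (List (String × String))) × Int :=
  ([("r1", 5), ("r2", 7)], [("src", ["r1", "r2"])], some [("dest", "r2")], 9, none, 0)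

def Spec_forwarding_values (registers : List (String × Int)) (instr : List (String × List String)) (ex_instr : Option (List (String × String))) (ex_result : Int) (mem_instr : Option (List (String × String))) (mem_result : Int) (out : List Int) : Prop := out = forwarding_values_alt registers instr ex_instr ex_result mem_instr mem_result
instance (registers : List (String × Int)) (instr : List (String × List String)) (ex_instr : Option (List (String × String))) (ex_result : Int) (mem_instr : Option (List (String × String))) (mem_result : Int) (out : List Int) : Decidable (Spec_forwarding_values registers instr ex_instr ex_result mem_instr mem_result out) := by unfold Spec_forwarding_values; infer_instance

-- ===== CLAIM (what is proved, stated in full; the proofs are below) =====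
def Claim_equal_forwarding_values : Prop := ∀ (registers : List (String × Int)) (instr : List (String × List String)) (ex_instr : Option (List (String × String))) (ex_result : Int) (mem_instr : Option (List (String × String))) (mem_result : Int), Dom_forwarding_values registers instr ex_instr ex_result mem_instr mem_result → Pre_forwarding_values registers instr ex_instr ex_result mem_instr mem_result → Spec_forwarding_values registers instr ex_instr ex_result mem_instr mem_result (forwarding_values registers instr ex_instr ex_result mem_instr mem_result)

-- ===== LEMMAS AND PROOFS =====

-- mapping over a list zipped with a map of itself is a pointwise map
theorem pv_zip_self_map {α β γ : Type} (f : α → β) (h : α → β → γ) :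
    ∀ (l : List α), ((l.zip (l.map f)).map (fun p => h p.1 p.2)) = l.map (fun s => h s (f s)) := by
  intro l
  induction l with
  | nil => rfl
  | cons a t ih => simp [ih]

-- a stamping pass over aligned slots acts pointwise
theorem pv_stamp_map (f : String → Option Int) (d : String) (v : Int) (l : List String) :
    fvStamp l (l.map f) d v = l.map (fun s => if s = d then some v else f s) := by
  unfold fvStamp
  exact pv_zip_self_map f (fun s o => if s = d then some v else o) l

-- the final fill pass acts pointwise too
theorem pv_fill_map (registers : List (String × Int)) (f : String → Option Int) (l : List String) :
    ((l.zip (l.map f)).map (fun p => match p.2 with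
      | some v => v
      | none => (pvLookup registers p.1).getD 0))
    = l.map (fun s => match f s with
      | some v => v
      | none => (pvLookup registers s).getD 0) :=
  pv_zip_self_map f (fun s o => match o with
      | some v => v
      | none => (pvLookup registers s).getD 0) l

-- ===== VERDICT (by name: the statement is the Claim_ definition above) =====
theorem forwarding_values_spec : Claim_equal_forwarding_values := by
  intro registers instr ex_instr ex_result mem_instr mem_result _ _
  unfold Spec_forwarding_values forwarding_values forwarding_values_alt
  rw [PySem.List.foldl_append_singleton_eq_map]
  rcases hm : pvDest mem_instr with _ | dm <;> rcases he : pvDest ex_instr with _ | de <;>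
    simp only [pv_stamp_map, pv_fill_map] <;>
    refine List.map_congr_left (fun s _ => ?_) <;> simp only [beq_iff_eq, Option.some.injEq]
  · rfl
  · by_cases h : s = de
    · simp [h]
    · simp [h, Ne.symm h]
  · by_cases h : s = dm
    · simp [h]
    · simp [h, Ne.symm h]
  · by_cases h1 : s = de
    · simp [h1]
    · by_cases h2 : s = dm
      · subst h2; simp [h1, Ne.symm h1]
      · simp [h1, h2, Ne.symm h1, Ne.symm h2]
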